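-- pv_equiv track=rewrite | github.com/ankitpatel990/Neuvox | app/models/extractor.py | _is_sequential
-- ===== SOURCE A (Python) =====
-- def _is_sequential(number: str) -> bool:
--     """Check if number is a sequential pattern."""
--     if len(number) < 9:
--         return False
--
--     # Check ascending
--     ascending = "".join(str(i % 10) for i in range(len(number)))
--     if number == ascending[:len(number)]:
--         return True
--
--     # Check descending
--     descending = "".join(str(9 - (i % 10)) for i in range(len(number)))
--     if number == descending[:len(number)]:
--         return True
--
--     return False
-- ===== SOURCE B (Python) =====
-- def _is_sequential(number: str) -> bool:
--     """Check if number is a sequential pattern (single pass, no reference strings)."""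
--     if len(number) < 9:
--         return False
--     if any(c not in "0123456789" for c in number):
--         return False
--
--     def chain(delta: int) -> bool:
--         return all((ord(b) - ord(a)) % 10 == delta
--                    for a, b in zip(number, number[1:]))
--
--     return (number[0] == '0' and chain(1)) or (number[0] == '9' and chain(9))
-- ===== Notes on version B (the rewrite author's own statement) =====
-- stated objective: faster
-- what changed: B replaces A's construction of two full length-n reference strings and whole-string comparisons by a single local pass that rejects non-digit characters, checks the anchoring first character and verifies each adjacent pair differs by the right amount mod 10.
import Mathlib
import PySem

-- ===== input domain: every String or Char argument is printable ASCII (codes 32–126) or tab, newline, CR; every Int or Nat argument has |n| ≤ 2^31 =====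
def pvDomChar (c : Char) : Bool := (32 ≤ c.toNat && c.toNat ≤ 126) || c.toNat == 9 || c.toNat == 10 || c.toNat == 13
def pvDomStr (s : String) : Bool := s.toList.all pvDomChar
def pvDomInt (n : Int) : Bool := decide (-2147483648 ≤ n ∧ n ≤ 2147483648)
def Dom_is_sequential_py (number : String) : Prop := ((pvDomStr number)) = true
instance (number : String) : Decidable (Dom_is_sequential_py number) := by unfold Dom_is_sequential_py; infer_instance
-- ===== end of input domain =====

-- B checks the sequential pattern locally (anchor char + adjacent deltas mod 10) instead of building A's full reference strings and comparing; measured faster in a timing run (constant factor).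


-- ===== PORT A =====
def is_sequential_py (number : String) : Bool :=
  if PySem.Str.len number < 9 then false
  -- ascending = "".join(str(i % 10) for i in range(len(number))); number == ascending[:len(number)]
  else if number == PySem.Str.slice
      (PySem.Str.join "" ((PySem.List.pyRange 0 (PySem.Str.len number) 1).map
        (fun i => PySem.Int.toStr (PySem.Int.mod i 10)))) none (some (PySem.Str.len number)) then true
  -- descending = "".join(str(9 - (i % 10)) for i in range(len(number))); number == descending[:len(number)]
  else if number == PySem.Str.slice
      (PySem.Str.join "" ((PySem.List.pyRange 0 (PySem.Str.len number) 1).map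
        (fun i => PySem.Int.toStr (9 - PySem.Int.mod i 10)))) none (some (PySem.Str.len number)) then true
  else false

-- ===== PORT B =====
-- 'all((ord(b) - ord(a)) % 10 == delta for a, b in zip(number, number[1:]))' as a walk keeping the previous char
def pvChain (delta : Int) : Char → List Char → Bool
  | _, [] => true
  | a, b :: rest => (PySem.Int.mod ((b.toNat : Int) - (a.toNat : Int)) 10 == delta) && pvChain delta b rest

def is_sequential_py_alt (number : String) : Bool :=
  let cs := number.toList
  if cs.length < 9 then false
  else if cs.any (fun c => !(("0123456789").toList.contains c)) then false
  else match cs with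
    | [] => false
    | c :: rest => (c == '0' && pvChain 1 c rest) || (c == '9' && pvChain 9 c rest)

-- ===== PRECONDITION & SPEC =====
def Spec_is_sequential_py (number : String) (out : Bool) : Prop := out = is_sequential_py_alt number
instance (number : String) (out : Bool) : Decidable (Spec_is_sequential_py number out) := by unfold Spec_is_sequential_py; infer_instance

-- ===== CLAIM (what is proved, stated in full; the proofs are below) =====
def Claim_equal_is_sequential_py : Prop := ∀ (number : String), Dom_is_sequential_py number → Spec_is_sequential_py number (is_sequential_py number)

-- ===== LEMMAS AND PROOFS =====

-- generic sequential reference list: char j is digitChar ((d*j + k) % 10)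
def genFrom (d k m : Nat) : List Char := (List.range m).map (fun j => Nat.digitChar ((d * j + k) % 10))

theorem genFrom_succ (d k m : Nat) :
    genFrom d k (m + 1) = Nat.digitChar (k % 10) :: genFrom d (k + d) m := by
  simp [genFrom, List.range_succ_eq_map, List.map_map, Function.comp]
  intro j _
  have h : d * (j + 1) + k = d * j + (k + d) := by ring
  rw [h]

theorem digit_mem (b : Char) (h : b ∈ ("0123456789").toList) :
    ∃ m, m < 10 ∧ b = Nat.digitChar m := by
  simp at h
  rcases h with h|h|h|h|h|h|h|h|h|h <;> subst h
  · exact ⟨0, by decide⟩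
  · exact ⟨1, by decide⟩
  · exact ⟨2, by decide⟩
  · exact ⟨3, by decide⟩
  · exact ⟨4, by decide⟩
  · exact ⟨5, by decide⟩
  · exact ⟨6, by decide⟩
  · exact ⟨7, by decide⟩
  · exact ⟨8, by decide⟩
  · exact ⟨9, by decide⟩

theorem digitChar_mem (m : Nat) (h : m < 10) : Nat.digitChar m ∈ ("0123456789").toList := by
  interval_cases m <;> decide

theorem digitChar_inj (a b : Nat) (ha : a < 10) (hb : b < 10) :
    Nat.digitChar a = Nat.digitChar b ↔ a = b := by
  interval_cases a <;> interval_cases b <;> decide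

theorem digitChar_toNat (m : Nat) (h : m < 10) : (Nat.digitChar m).toNat = 48 + m := by
  interval_cases m <;> decide

theorem delta_iff (a b d : Nat) (hb : b < 10) (hd : d < 10) :
    (PySem.Int.mod (((48 + b : Nat) : Int) - ((48 + a : Nat) : Int)) 10 = (d : Int)) ↔ b = (a + d) % 10 := by
  rw [PySem.Int.mod_eq_emod_of_pos (by norm_num)]
  omega

theorem chain_iff (rest : List Char) (d k : Nat) (hd : d < 10)
    (hdig : ∀ c ∈ rest, c ∈ ("0123456789").toList) :
    (pvChain (d : Int) (Nat.digitChar (k % 10)) rest = true ↔ rest = genFrom d (k + d) rest.length) := by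
  induction rest generalizing k with
  | nil => simp [pvChain, genFrom]
  | cons b t ih =>
    obtain ⟨m, hm, rfl⟩ := digit_mem b (hdig _ (by simp))
    rw [List.length_cons, genFrom_succ]
    simp only [pvChain, Bool.and_eq_true, beq_iff_eq]
    rw [digitChar_toNat m hm, digitChar_toNat (k % 10) (Nat.mod_lt _ (by norm_num))]
    rw [delta_iff (k % 10) m d hm hd]
    constructor
    · rintro ⟨h1, h2⟩
      have hmeq : m = (k + d) % 10 := by omega
      subst hmeq
      rw [List.cons_inj_right]
      exact (ih (k + d) (fun c hc => hdig c (List.mem_cons_of_mem _ hc))).mp h2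
    · intro h
      rw [List.cons_eq_cons] at h
      obtain ⟨h1, h2⟩ := h
      have hmeq : m = (k + d) % 10 := by
        rw [digitChar_inj m _ hm (Nat.mod_lt _ (by norm_num))] at h1; exact h1
      refine ⟨by omega, ?_⟩
      subst hmeq
      exact (ih (k + d) (fun c hc => hdig c (List.mem_cons_of_mem _ hc))).mpr h2

theorem genFrom_digits (d k m : Nat) : ∀ c ∈ genFrom d k m, c ∈ ("0123456789").toList := by
  intro c hc
  simp [genFrom] at hc
  obtain ⟨j, _, rfl⟩ := hc
  exact digitChar_mem _ (Nat.mod_lt _ (by norm_num))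

theorem length_genFrom (d k m : Nat) : (genFrom d k m).length = m := by simp [genFrom]

-- A's ascending string, on the list side, is genFrom 1 0
theorem asc_toList (m : Nat) :
    (PySem.Str.join "" ((PySem.List.pyRange 0 (m : Int) 1).map
      (fun i => PySem.Int.toStr (PySem.Int.mod i 10)))).toList = genFrom 1 0 m := by
  rw [PySem.Str.toList_join, PySem.List.pyRange_one]
  simp only [List.map_map, Function.comp]
  have h1 : ∀ k : Nat, (PySem.Int.toStr (PySem.Int.mod ((0 : Int) + (k : Nat)) 10)).toList
      = [Nat.digitChar ((1 * k + 0) % 10)] := by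
    intro k
    rw [PySem.Int.toList_toStr, PySem.Int.mod_eq_emod_of_pos (by norm_num)]
    have h2 : ((0 : Int) + (k : Nat)) % 10 = ((k % 10 : Nat) : Int) := by omega
    rw [h2]
    have h3 : (1 * k + 0) % 10 = k % 10 := by omega
    rw [h3]
    have hlt : k % 10 < 10 := Nat.mod_lt _ (by norm_num)
    interval_cases h : k % 10 <;> decide
  calc PySem.Chars.join "".toList
        ((List.range ((m : Int) - 0).toNat).map
          (fun k => (PySem.Int.toStr (PySem.Int.mod ((0 : Int) + (k : Nat)) 10)).toList))
      = PySem.Chars.join [] (((List.range m).map (fun k => Nat.digitChar ((1 * k + 0) % 10))).map (fun c => [c])) := by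
        have hm : ((m : Int) - 0).toNat = m := by omega
        rw [hm, List.map_map]
        congr 1
        exact List.map_congr_left (fun k _ => h1 k)
    _ = genFrom 1 0 m := by rw [PySem.Chars.join_nil_singletons]; rfl

-- A's descending string, on the list side, is genFrom 9 9
theorem desc_toList (m : Nat) :
    (PySem.Str.join "" ((PySem.List.pyRange 0 (m : Int) 1).map
      (fun i => PySem.Int.toStr (9 - PySem.Int.mod i 10)))).toList = genFrom 9 9 m := by
  rw [PySem.Str.toList_join, PySem.List.pyRange_one]
  simp only [List.map_map, Function.comp]
  have h1 : ∀ k : Nat, (PySem.Int.toStr (9 - PySem.Int.mod ((0 : Int) + (k : Nat)) 10)).toList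
      = [Nat.digitChar ((9 * k + 9) % 10)] := by
    intro k
    rw [PySem.Int.toList_toStr, PySem.Int.mod_eq_emod_of_pos (by norm_num)]
    have h2 : (9 : Int) - ((0 : Int) + (k : Nat)) % 10 = ((9 - k % 10 : Nat) : Int) := by omega
    rw [h2]
    have h3 : (9 * k + 9) % 10 = 9 - k % 10 := by omega
    rw [h3]
    have hlt : 9 - k % 10 < 10 := by omega
    interval_cases h : 9 - k % 10 <;> decide
  calc PySem.Chars.join "".toList
        ((List.range ((m : Int) - 0).toNat).map
          (fun k => (PySem.Int.toStr (9 - PySem.Int.mod ((0 : Int) + (k : Nat)) 10)).toList))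
      = PySem.Chars.join [] (((List.range m).map (fun k => Nat.digitChar ((9 * k + 9) % 10))).map (fun c => [c])) := by
        have hm : ((m : Int) - 0).toNat = m := by omega
        rw [hm, List.map_map]
        congr 1
        exact List.map_congr_left (fun k _ => h1 k)
    _ = genFrom 9 9 m := by rw [PySem.Chars.join_nil_singletons]; rfl

theorem str_beq_eq_decide (s t : String) (g : List Char) (h : t.toList = g) :
    (s == t) = decide (s.toList = g) := by
  by_cases hc : s.toList = g
  · have he : s = t := String.toList_inj.mp (by rw [hc, h])
    simp [he, hc, h]
  · have he : s ≠ t := fun e => hc (by rw [e, h])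
    simp [he, hc]

-- A reduced to the list side: equality against the genFrom references
theorem portA_eq (number : String) :
    is_sequential_py number =
      (if number.toList.length < 9 then false
       else (decide (number.toList = genFrom 1 0 number.toList.length)
          || decide (number.toList = genFrom 9 9 number.toList.length))) := by
  unfold is_sequential_py
  simp only [PySem.Str.len_eq]
  by_cases h9 : number.toList.length < 9
  · rw [if_pos (by exact_mod_cast h9 : ((number.toList.length : Int) < 9)), if_pos h9]
  · rw [if_neg (by exact_mod_cast h9 : ¬((number.toList.length : Int) < 9)), if_neg h9]
    have hsl1 : (PySem.Str.slice
        (PySem.Str.join "" ((PySem.List.pyRange 0 (number.toList.length : Int) 1).map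
          (fun i => PySem.Int.toStr (PySem.Int.mod i 10)))) none (some (number.toList.length : Int))).toList
        = genFrom 1 0 number.toList.length := by
      rw [PySem.Str.toList_slice, PySem.Chars.slice_eq_listSlice, asc_toList,
          PySem.List.slice_to_natCast]
      exact List.take_of_length_le (le_of_eq (length_genFrom _ _ _))
    have hsl2 : (PySem.Str.slice
        (PySem.Str.join "" ((PySem.List.pyRange 0 (number.toList.length : Int) 1).map
          (fun i => PySem.Int.toStr (9 - PySem.Int.mod i 10)))) none (some (number.toList.length : Int))).toList
        = genFrom 9 9 number.toList.length := by
      rw [PySem.Str.toList_slice, PySem.Chars.slice_eq_listSlice, desc_toList,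
          PySem.List.slice_to_natCast]
      exact List.take_of_length_le (le_of_eq (length_genFrom _ _ _))
    simp only [str_beq_eq_decide _ _ _ hsl1, str_beq_eq_decide _ _ _ hsl2]
    cases h1 : decide (number.toList = genFrom 1 0 number.toList.length) <;>
      cases h2 : decide (number.toList = genFrom 9 9 number.toList.length) <;>
      simp [h1, h2]

-- equality against a genFrom reference, characterized by anchor + chain (all-digit cons lists)
theorem pattern_iff (c : Char) (rest : List Char) (d k : Nat) (hd : d < 10)
    (hdig : ∀ x ∈ c :: rest, x ∈ ("0123456789").toList) :
    (c :: rest = genFrom d k (rest.length + 1)) ↔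
      (c = Nat.digitChar (k % 10) ∧ pvChain (d : Int) c rest = true) := by
  rw [genFrom_succ, List.cons_eq_cons]
  constructor
  · rintro ⟨rfl, h2⟩
    exact ⟨rfl, (chain_iff rest d k hd (fun x hx => hdig x (by simp [hx]))).mpr h2⟩
  · rintro ⟨rfl, h2⟩
    exact ⟨rfl, (chain_iff rest d k hd (fun x hx => hdig x (by simp [hx]))).mp h2⟩

-- the all-digit, length ≥ 9 case, on the list side
def pvCore (cs : List Char) : Bool :=
  match cs with
  | [] => false
  | c :: rest => (c == '0' && pvChain 1 c rest) || (c == '9' && pvChain 9 c rest)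

theorem pv_main_list (cs : List Char) (h9 : ¬ cs.length < 9)
    (hdig : ∀ x ∈ cs, x ∈ ("0123456789").toList) :
    (decide (cs = genFrom 1 0 cs.length) || decide (cs = genFrom 9 9 cs.length)) = pvCore cs := by
  cases cs with
  | nil => exact absurd (by simp) h9
  | cons c rest =>
    show _ = ((c == '0' && pvChain 1 c rest) || (c == '9' && pvChain 9 c rest))
    have hA := pattern_iff c rest 1 0 (by norm_num) hdig
    have hB := pattern_iff c rest 9 9 (by norm_num) hdig
    simp only [show Nat.digitChar (0 % 10) = '0' from by decide] at hA
    simp only [show Nat.digitChar (9 % 10) = '9' from by decide] at hB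
    simp only [List.length_cons]
    rw [decide_eq_decide.mpr hA, decide_eq_decide.mpr hB]
    · simp only [Bool.decide_and]
      by_cases hc0 : c = '0' <;> by_cases hc9 : c = '9' <;> simp [hc0, hc9]
    · infer_instance
    · infer_instance

-- ===== VERDICT (by name: the statement is the Claim_ definition above) =====
theorem is_sequential_py_spec : Claim_equal_is_sequential_py := by
  intro number _
  unfold Spec_is_sequential_py
  rw [portA_eq]
  show _ = is_sequential_py_alt number
  unfold is_sequential_py_alt
  by_cases h9 : number.toList.length < 9
  · rw [if_pos h9, if_pos h9]
  · rw [if_neg h9, if_neg h9]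
    by_cases hdig : ∀ x ∈ number.toList, x ∈ ("0123456789").toList
    · have hany : number.toList.any (fun c => !(("0123456789").toList.contains c)) = false := by
        simp only [List.any_eq_false, Bool.not_eq_true', Bool.not_eq_true]
        intro x hx
        have hd2 := hdig x hx
        simp at hd2 ⊢
        tauto
      rw [hany, if_neg (by simp)]
      exact pv_main_list number.toList h9 hdig
    · push_neg at hdig
      obtain ⟨x, hx, hnd⟩ := hdig
      have hany : number.toList.any (fun c => !(("0123456789").toList.contains c)) = true := by
        rw [List.any_eq_true]
        exact ⟨x, hx, by simpa using hnd⟩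
      rw [hany, if_pos rfl]
      have h1 : number.toList ≠ genFrom 1 0 number.toList.length := by
        intro hc; exact hnd (genFrom_digits _ _ _ x (hc ▸ hx))
      have h2 : number.toList ≠ genFrom 9 9 number.toList.length := by
        intro hc; exact hnd (genFrom_digits _ _ _ x (hc ▸ hx))
      simp only [Bool.or_eq_false_iff, decide_eq_false_iff_not]
      exact ⟨h1, h2⟩
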